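-- pv_equiv track=rewrite | github.com/Yunus-Gedik/Algorithms | HW 5/141044026_CSE321_HW5.py | opt_5
-- ===== SOURCE A (Python) =====
-- def opt_5(arr):
--     oper = 0
--     arr.sort()
--
--     summ = arr[0]
--
--     i = 1
--     while i < len(arr):
--         oper += summ + arr[i]
--         summ += arr[i]
--         i += 1
--
--     return oper
-- ===== SOURCE B (Python) =====
-- def opt_5(arr):
--     arr.sort()
--     n = len(arr)
--     total = arr[0] * (n - 1)
--     for j, v in enumerate(arr[1:], 1):
--         total += v * (n - j)
--     return total
-- ===== Notes on version B (the rewrite author's own statement) =====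
-- stated objective: alternative
-- what changed: Replaces A's running prefix-sum accumulator loop with a direct weighted sum: after sorting, the element at sorted position j contributes its value times (n-j), with the minimum weighted n-1, computed in one enumerate pass with no running sum.
import Mathlib
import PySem

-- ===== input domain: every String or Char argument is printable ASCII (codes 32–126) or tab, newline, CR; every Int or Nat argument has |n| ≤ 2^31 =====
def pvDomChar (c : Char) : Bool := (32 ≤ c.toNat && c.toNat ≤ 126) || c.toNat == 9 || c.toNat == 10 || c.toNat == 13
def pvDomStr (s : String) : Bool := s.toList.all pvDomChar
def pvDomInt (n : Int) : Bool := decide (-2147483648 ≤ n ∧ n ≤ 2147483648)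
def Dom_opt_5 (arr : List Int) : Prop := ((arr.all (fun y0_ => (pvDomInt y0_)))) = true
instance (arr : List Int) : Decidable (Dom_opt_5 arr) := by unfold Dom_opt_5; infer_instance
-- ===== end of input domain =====

-- B replaces A's running prefix-sum accumulator with a direct weighted sum over sorted
-- positions (alternative decomposition, same cost). Both Pythons sort arr IN PLACE; the
-- equivalence proved here is about the return value (the mutation is identical anyway).

-- ===== PORT A =====
-- the while loop: state (oper, summ); oper += summ + arr[i]; summ += arr[i]
def opt5LoopA : List Int → Int → Int → Int
  | [], oper, _ => oper
  | y :: t, oper, summ => opt5LoopA t (oper + (summ + y)) (summ + y)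

def opt_5 (arr : List Int) : Int :=
  match PySem.List.sorted arr (fun x => x) false with
  | [] => 0   -- first-element access raises IndexError in Python; excluded by Pre_opt_5
  | x :: rest => opt5LoopA rest 0 x

-- ===== PORT B =====
def opt_5_alt (arr : List Int) : Int :=
  match PySem.List.sorted arr (fun x => x) false with
  | [] => 0   -- first-element access raises IndexError in Python; excluded by Pre_opt_5
  | x :: rest =>
    let n : Int := (rest.length : Int) + 1
    (PySem.List.enumerate rest 1).foldl (fun total p => total + p.2 * (n - p.1)) (x * (n - 1))

-- ===== PRECONDITION & SPEC =====
-- Pre_ excludes exactly the empty list, on which A raises IndexError accessing the first element.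
def Pre_opt_5 (arr : List Int) : Prop := arr ≠ []
instance (arr : List Int) : Decidable (Pre_opt_5 arr) := by unfold Pre_opt_5; infer_instance
def pvWitness_opt_5 : List Int := [3, 1, 2]

def Spec_opt_5 (arr : List Int) (out : Int) : Prop := out = opt_5_alt arr
instance (arr : List Int) (out : Int) : Decidable (Spec_opt_5 arr out) := by unfold Spec_opt_5; infer_instance

-- ===== CLAIM (what is proved, stated in full; the proofs are below) =====
def Claim_equal_opt_5 : Prop := ∀ (arr : List Int), Dom_opt_5 arr → Pre_opt_5 arr → Spec_opt_5 arr (opt_5 arr)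

-- ===== LEMMAS AND PROOFS =====

-- the accumulator loop equals the weighted fold, for any start index j with n = j + |t|
lemma opt5LoopA_eq_weighted (t : List Int) (oper summ j n : Int)
    (h : n = j + t.length) :
    opt5LoopA t oper summ =
      (PySem.List.enumerate t j).foldl (fun total p => total + p.2 * (n - p.1))
        (oper + summ * t.length) := by
  induction t generalizing oper summ j with
  | nil => simp [opt5LoopA, PySem.List.enumerate_nil]
  | cons y t ih =>
    rw [PySem.List.enumerate_cons]
    simp only [opt5LoopA, List.foldl_cons]
    rw [ih (oper + (summ + y)) (summ + y) (j + 1)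
      (by simp only [List.length_cons] at h; push_cast at h ⊢; omega)]
    have hn : n - j = (t.length : Int) + 1 := by
      simp only [List.length_cons] at h; push_cast at h; omega
    congr 1
    rw [hn]
    simp only [List.length_cons]
    push_cast
    ring

-- ===== VERDICT (by name: the statement is the Claim_ definition above) =====
theorem opt_5_spec : Claim_equal_opt_5 := by
  intro arr _ hpre
  unfold Spec_opt_5 opt_5 opt_5_alt
  cases hs : PySem.List.sorted arr (fun x => x) false with
  | nil =>
    have harr : arr = [] := by
      have hperm := PySem.List.sorted_perm arr (fun x => x) false
      rw [hs] at hperm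
      exact hperm.symm.eq_nil
    exact absurd harr hpre
  | cons x rest =>
    simp only []
    rw [opt5LoopA_eq_weighted rest 0 x 1 ((rest.length : Int) + 1) (by omega)]
    congr 1
    ring
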